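-- pv_equiv track=rewrite | github.com/dancing-bear-show/dancing-bear | wifi/diagnostics.py | _build_ping_targets
-- ===== SOURCE A (Python) =====
-- from typing import Any, Callable, Dict, List, Optional, Sequence, Tuple
--
-- def _build_ping_targets(gateway: Optional[str], targets: List[str]) -> List[Tuple[str, str]]:
--     """Build deduplicated list of (label, target) pairs for pinging."""
--     result: List[Tuple[str, str]] = []
--     seen: set = set()
--     if gateway:
--         result.append(("gateway", gateway))
--         seen.add(("gateway", gateway))
--     for tgt in targets:
--         if gateway and tgt == gateway:
--             continue
--         key = (tgt, tgt)
--         if key not in seen: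
--             seen.add(key)
--             result.append(key)
--     return result
-- ===== SOURCE B (Python) =====
-- from typing import List, Optional, Tuple
--
-- def _build_ping_targets(gateway: Optional[str], targets: List[str]) -> List[Tuple[str, str]]:
--     """Two staged passes with no dedup state during emission: first build a map
--     target -> index of its FIRST occurrence (by overwriting while scanning backwards),
--     then emit the pair for exactly the first occurrences."""
--     first = {}
--     for i, t in reversed(list(enumerate(targets))):
--         first[t] = i
--     head = [("gateway", gateway)] if gateway else []
--     return head + [(t, t) for i, t in enumerate(targets)
--                    if first[t] == i and not (gateway and t == gateway)]
-- ===== Notes on version B (the rewrite author's own statement) =====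
-- stated objective: alternative
-- what changed: Replaces A's stateful single pass (a seen-set of pairs maintained alongside the result) with two staged passes: a backward scan that builds a first-occurrence index map by overwriting, then an emission pass that keeps a target iff its index equals that first-occurrence index - no dedup state exists during emission.
import Mathlib
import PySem

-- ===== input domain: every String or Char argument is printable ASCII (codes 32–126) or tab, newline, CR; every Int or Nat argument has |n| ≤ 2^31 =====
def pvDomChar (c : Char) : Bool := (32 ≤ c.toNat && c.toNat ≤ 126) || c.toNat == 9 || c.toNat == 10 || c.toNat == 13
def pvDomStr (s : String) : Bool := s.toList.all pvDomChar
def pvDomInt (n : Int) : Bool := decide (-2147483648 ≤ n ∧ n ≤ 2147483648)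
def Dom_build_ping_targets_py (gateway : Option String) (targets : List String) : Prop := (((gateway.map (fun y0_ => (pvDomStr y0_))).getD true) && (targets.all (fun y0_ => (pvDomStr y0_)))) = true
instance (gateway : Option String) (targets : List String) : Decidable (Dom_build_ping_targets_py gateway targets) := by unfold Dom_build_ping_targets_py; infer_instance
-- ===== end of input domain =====

-- B replaces A's inline seen-set with two staged passes: a backward scan building a first-occurrence index map, then an emission pass keeping exactly the first occurrences; alternative algorithm, same cost.

-- ===== PORT A =====
def build_ping_targets_py (gateway : Option String) (targets : List String) : List (String × String) :=
  let gwTruthy : Bool := match gateway with | none => false | some s => s ≠ ""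
  let gw : String := gateway.getD ""
  let init : List (String × String) × PySem.Set (String × String) :=
    if gwTruthy then ([("gateway", gw)], PySem.Set.add PySem.Set.empty ("gateway", gw))
    else ([], PySem.Set.empty)
  let final := targets.foldl (fun st tgt =>
    if gwTruthy && tgt == gw then st
    else
      let key := (tgt, tgt)
      if PySem.Set.contains st.2 key then st
      else (st.1 ++ [key], PySem.Set.add st.2 key)) init
  final.1

-- ===== PORT B =====
-- Python's first[t] (key always present: every t of targets was inserted) is ported as get? … == some i.
def build_ping_targets_py_alt (gateway : Option String) (targets : List String) : List (String × String) :=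
  let gwTruthy : Bool := match gateway with | none => false | some s => s ≠ ""
  let gw : String := gateway.getD ""
  let first : PySem.Dict String Int :=
    (PySem.List.enumerate targets 0).reverse.foldl
      (fun d p => PySem.Dict.insert d p.2 p.1) PySem.Dict.empty
  let head : List (String × String) := if gwTruthy then [("gateway", gw)] else []
  let body : List (String × String) :=
    ((PySem.List.enumerate targets 0).filter
      (fun p => (PySem.Dict.get? first p.2 == some p.1)
                && !(gwTruthy && p.2 == gw))).map (fun p => (p.2, p.2))
  head ++ body

-- ===== PRECONDITION & SPEC =====
def Spec_build_ping_targets_py (gateway : Option String) (targets : List String) (out : List (String × String)) : Prop := out = build_ping_targets_py_alt gateway targets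
instance (gateway : Option String) (targets : List String) (out : List (String × String)) : Decidable (Spec_build_ping_targets_py gateway targets out) := by unfold Spec_build_ping_targets_py; infer_instance

-- ===== CLAIM (what is proved, stated in full; the proofs are below) =====
def Claim_equal_build_ping_targets_py : Prop := ∀ (gateway : Option String) (targets : List String), Dom_build_ping_targets_py gateway targets → Spec_build_ping_targets_py gateway targets (build_ping_targets_py gateway targets)

-- ===== LEMMAS AND PROOFS =====

-- Common normal form of both tails: recursion carrying the explicit prefix of already-passed targets.
def pvBody (gwTruthy : Bool) (gw : String) : List String → List String → List (String × String)
  | _, [] => []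
  | pre, t :: r =>
    if pre.contains t || (gwTruthy && t == gw) then pvBody gwTruthy gw (pre ++ [t]) r
    else (t, t) :: pvBody gwTruthy gw (pre ++ [t]) r

-- B's backward-built dict, named for the proofs (definitionally the fold in port B).
def pvFirst (targets : List String) : PySem.Dict String Int :=
  (PySem.List.enumerate targets 0).reverse.foldl
    (fun d p => PySem.Dict.insert d p.2 p.1) PySem.Dict.empty

-- A's fold equals res ++ pvBody, given the seen-set agrees with prefix membership on non-gateway targets.
lemma loopA_eq (gwTruthy : Bool) (gw : String) (l : List String) :
    ∀ (pre : List String) (res : List (String × String)) (s : PySem.Set (String × String)),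
    (∀ t : String, (gwTruthy && t == gw) = false → ((t, t) ∈ s ↔ t ∈ pre)) →
    (l.foldl (fun st tgt =>
      if gwTruthy && tgt == gw then st
      else if PySem.Set.contains st.2 (tgt, tgt) then st
      else (st.1 ++ [(tgt, tgt)], PySem.Set.add st.2 (tgt, tgt))) (res, s)).1
    = res ++ pvBody gwTruthy gw pre l := by
  induction l with
  | nil => intro pre res s _; simp [pvBody]
  | cons t r ih =>
    intro pre res s hs
    simp only [List.foldl_cons, pvBody]
    by_cases hg : (gwTruthy && t == gw) = true
    · rw [if_pos hg]
      have hcond : (pre.contains t || (gwTruthy && t == gw)) = true := by rw [hg]; simp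
      rw [hcond]; simp only [if_true]
      refine ih (pre ++ [t]) res s ?_
      intro t' ht'
      have hne : t' ≠ t := by rintro rfl; rw [ht'] at hg; exact absurd hg (by simp)
      simp [hs t' ht', hne]
    · rw [Bool.not_eq_true] at hg
      rw [if_neg (by rw [hg]; exact Bool.false_ne_true)]
      by_cases hp : t ∈ pre
      · have hcs : PySem.Set.contains s (t, t) = true := by
          simp only [PySem.Set.contains_eq_listContains, List.contains_eq_mem, decide_eq_true_iff]
          exact (hs t hg).mpr hp
        rw [if_pos hcs]
        have hcond : (pre.contains t || (gwTruthy && t == gw)) = true := by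
          simp [hg, hp]
        rw [hcond]; simp only [if_true]
        refine ih (pre ++ [t]) res s ?_
        intro t' ht'
        by_cases h : t' = t
        · subst h; simp [hs t' ht', hp]
        · simp [hs t' ht', h]
      · have hcs : PySem.Set.contains s (t, t) = false := by
          simp only [PySem.Set.contains_eq_listContains, List.contains_eq_mem,
            decide_eq_false_iff_not]
          exact fun h => hp ((hs t hg).mp h)
        rw [if_neg (by rw [hcs]; exact Bool.false_ne_true)]
        have hcond : (pre.contains t || (gwTruthy && t == gw)) = false := by
          simp [hg, hp]
        rw [hcond]
        simp only [Bool.false_eq_true, if_false]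
        have hadd : PySem.Set.add s (t, t) = s ++ [(t, t)] := by
          unfold PySem.Set.add; rw [hcs]; rfl
        rw [hadd, ih (pre ++ [t]) (res ++ [(t, t)]) (s ++ [(t, t)]) ?_]
        · simp
        · intro t' ht'
          by_cases h : t' = t
          · subst h; simp
          · simp [hs t' ht', h, Prod.ext_iff]

-- Lookup in a dict built by folding inserts: last insertion wins, else the initial dict.
lemma foldl_insert_get? (l : List (Int × String)) :
    ∀ (d : PySem.Dict String Int) (t : String),
    PySem.Dict.get? (l.foldl (fun d p => PySem.Dict.insert d p.2 p.1) d) t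
    = ((l.reverse.find? (fun p => p.2 == t)).map (fun q => q.1)).or (PySem.Dict.get? d t) := by
  induction l with
  | nil => intro d t; simp
  | cons p rest ih =>
    intro d t
    simp only [List.foldl_cons, List.reverse_cons, List.find?_append, ih]
    cases hq : rest.reverse.find? (fun p => p.2 == t) with
    | some q => simp
    | none =>
      simp only [Option.none_or, Option.map]
      by_cases hpt : (p.2 == t) = true
      · have ht : t = p.2 := (eq_of_beq hpt).symm
        simp [ht]
      · rw [Bool.not_eq_true] at hpt
        simp only [List.find?_cons, hpt]
        have hne : t ≠ p.2 := fun h => by subst h; simp at hpt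
        simp [PySem.Dict.get?_insert, hne]

-- pvFirst maps t to pre.length exactly when pre holds no earlier occurrence of t.
lemma lookup_first (pre r : List String) (t : String) :
    PySem.Dict.get? (pvFirst (pre ++ t :: r)) t = some ((pre.length : Int)) ↔ t ∉ pre := by
  unfold pvFirst
  rw [foldl_insert_get?, List.reverse_reverse, PySem.List.enumerate_append,
    List.find?_append, PySem.List.enumerate_cons]
  have hhd : ((fun p => p.2 == t) ((0 : Int) + (pre.length : Int), t)) = true := by simp
  cases hf : (PySem.List.enumerate pre 0).find? (fun p => p.2 == t) with
  | none =>
    have hnp : t ∉ pre := by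
      intro hm
      obtain ⟨j, hj, hje⟩ := List.getElem_of_mem hm
      have hpmem : ((0 : Int) + (j : Int), t) ∈ PySem.List.enumerate pre 0 :=
        (PySem.List.mem_enumerate_iff _ _ _).mpr ⟨j, hj, by rw [hje]⟩
      have := List.find?_eq_none.mp hf _ hpmem
      simp at this
    simp [hnp]
  | some q =>
    have hpq := List.find?_some hf
    have hmq := List.mem_of_find?_eq_some hf
    obtain ⟨j, hj, rfl⟩ := (PySem.List.mem_enumerate_iff _ _ _).mp hmq
    have ht : pre[j] = t := by simpa using hpq
    have hmem : t ∈ pre := ht ▸ List.getElem_mem hj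
    simp [hmem]
    omega

-- The dict-based keep condition equals the prefix-membership condition, on enumerate's members.
lemma cond_eq (gwTruthy : Bool) (gw : String) (targets : List String) :
    (PySem.List.enumerate targets 0).filter
      (fun p => (PySem.Dict.get? (pvFirst targets) p.2 == some p.1)
                && !(gwTruthy && p.2 == gw))
    = (PySem.List.enumerate targets 0).filter
      (fun p => !(PySem.List.slice targets none (some p.1)).contains p.2
                && !(gwTruthy && p.2 == gw)) := by
  apply List.filter_congr
  intro p hp
  obtain ⟨j, hj, rfl⟩ := (PySem.List.mem_enumerate_iff _ _ _).mp hp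
  simp only [zero_add]
  have hsl : PySem.List.slice targets none (some ((j : Nat) : Int)) = targets.take j :=
    PySem.List.slice_to_natCast targets j
  have hdecomp : targets = targets.take j ++ targets[j] :: targets.drop (j + 1) := by
    conv_lhs => rw [← List.take_append_drop j targets]
    rw [List.drop_eq_getElem_cons hj]
  have hlen : (targets.take j).length = j := by
    simp [Nat.min_eq_left (le_of_lt hj)]
  have hiff := lookup_first (targets.take j) (targets.drop (j + 1)) targets[j]
  rw [← hdecomp, hlen] at hiff
  rw [hsl]
  by_cases hm : targets[j] ∈ targets.take j
  · have hne : PySem.Dict.get? (pvFirst targets) targets[j] ≠ some ((j : Nat) : Int) :=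
      fun h => (hiff.mp h) hm
    simp [hne, hm]
  · have heq : PySem.Dict.get? (pvFirst targets) targets[j] = some ((j : Nat) : Int) :=
      hiff.mpr hm
    simp [heq, hm]

-- B's enumerate/filter/map pipeline (prefix-membership form) equals pvBody.
lemma loopB_eq (gwTruthy : Bool) (gw : String) (targets : List String) (l : List String) :
    ∀ (pre : List String), targets = pre ++ l →
    ((PySem.List.enumerate l (pre.length : Int)).filter
      (fun p => !(PySem.List.slice targets none (some p.1)).contains p.2
                && !(gwTruthy && p.2 == gw))).map (fun p => (p.2, p.2))
    = pvBody gwTruthy gw pre l := by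
  induction l with
  | nil => intro pre _; simp [PySem.List.enumerate, pvBody]
  | cons t r ih =>
    intro pre htg
    rw [PySem.List.enumerate_cons]
    have hslice : PySem.List.slice targets none (some (pre.length : Int)) = pre := by
      rw [PySem.List.slice_to_natCast, htg, List.take_left]
    simp only [List.filter_cons, hslice]
    have hsucc : (pre.length : Int) + 1 = ((pre ++ [t]).length : Int) := by simp
    have hrec := ih (pre ++ [t]) (by simp [htg])
    rw [← hsucc] at hrec
    simp only [pvBody]
    by_cases hk : (pre.contains t || (gwTruthy && t == gw)) = true
    · have hf : (!pre.contains t && !(gwTruthy && t == gw)) = false := by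
        cases h1 : pre.contains t <;> cases h2 : (gwTruthy && t == gw) <;> simp_all
      rw [hk]; simp only [if_true]
      simp only [hf, Bool.false_eq_true, if_false]
      exact hrec
    · rw [Bool.not_eq_true] at hk
      have ht : (!pre.contains t && !(gwTruthy && t == gw)) = true := by
        cases h1 : pre.contains t <;> cases h2 : (gwTruthy && t == gw) <;> simp_all
      rw [hk]
      simp only [Bool.false_eq_true, if_false, ht, if_true, List.map_cons, hrec]

-- loopB_eq at the top level (start index 0, empty prefix), in port B's syntactic form.
lemma loopB_top (gwTruthy : Bool) (gw : String) (targets : List String) :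
    ((PySem.List.enumerate targets 0).filter
      (fun p => !(PySem.List.slice targets none (some p.1)).contains p.2
                && !(gwTruthy && p.2 == gw))).map (fun p => (p.2, p.2))
    = pvBody gwTruthy gw [] targets :=
  loopB_eq gwTruthy gw targets targets [] rfl

-- The two ports agree, for any truthiness flag and gateway string.
lemma bridge (gwTruthy : Bool) (gw : String) (targets : List String) :
    (targets.foldl (fun st tgt =>
      if gwTruthy && tgt == gw then st
      else if PySem.Set.contains st.2 (tgt, tgt) then st
      else (st.1 ++ [(tgt, tgt)], PySem.Set.add st.2 (tgt, tgt)))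
      (if gwTruthy then ([("gateway", gw)], PySem.Set.add PySem.Set.empty ("gateway", gw))
       else ([], PySem.Set.empty))).1
    = (if gwTruthy then [("gateway", gw)] else []) ++
      ((PySem.List.enumerate targets 0).filter
        (fun p => (PySem.Dict.get? (pvFirst targets) p.2 == some p.1)
                  && !(gwTruthy && p.2 == gw))).map (fun p => (p.2, p.2)) := by
  rw [cond_eq, loopB_top]
  cases gwTruthy with
  | false =>
    simp only [Bool.false_eq_true, if_false]
    refine loopA_eq false gw targets [] [] PySem.Set.empty ?_
    intro t _
    simp [PySem.Set.empty]
  | true =>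
    simp only [if_true]
    have hinit : PySem.Set.add PySem.Set.empty ("gateway", gw) = [("gateway", gw)] := rfl
    rw [hinit]
    refine loopA_eq true gw targets [] _ _ ?_
    intro t ht
    have hne : t ≠ gw := by
      intro h; subst h; simp at ht
    simp [Prod.ext_iff]
    intro _ h
    exact absurd h hne

-- ===== VERDICT (by name: the statement is the Claim_ definition above) =====
theorem build_ping_targets_py_spec : Claim_equal_build_ping_targets_py := by
  intro gateway targets _
  unfold Spec_build_ping_targets_py build_ping_targets_py build_ping_targets_py_alt
  cases gateway with
  | none => exact bridge false "" targets
  | some g => exact bridge (decide (g ≠ "")) g targets
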